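-- pv_equiv track=rewrite | github.com/fas89/forge-cli | fluid_build/cli/forge_dialogs.py | _match_alias_map
-- ===== SOURCE A (Python) =====
-- from typing import Any, Dict, List, Mapping, Optional
--
-- def _match_alias_map(normalized_raw: str, aliases: Mapping[str, str]) -> Optional[str]:
--     if normalized_raw in aliases:
--         return aliases[normalized_raw]
--     matching_aliases = [
--         (alias, value)
--         for alias, value in aliases.items()
--         if alias in normalized_raw or normalized_raw in alias
--     ]
--     if not matching_aliases:
--         return None
--     matching_aliases.sort(key=lambda item: len(item[0]), reverse=True)
--     return matching_aliases[0][1]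
-- ===== SOURCE B (Python) =====
-- from typing import Mapping, Optional
--
-- def _match_alias_map(normalized_raw: str, aliases: Mapping[str, str]) -> Optional[str]:
--     if normalized_raw in aliases:
--         return aliases[normalized_raw]
--     best_value = None
--     best_len = -1
--     for alias, value in aliases.items():
--         if (alias in normalized_raw or normalized_raw in alias) and len(alias) > best_len:
--             best_value = value
--             best_len = len(alias)
--     return best_value
-- ===== Notes on version B (the rewrite author's own statement) =====
-- stated objective: simpler
-- what changed: replaces the build-a-candidate-list-then-stable-reverse-sort-and-take-head step by a single pass that tracks the longest matching alias (strict > keeps the first of equal-longest, matching the stable sort)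
import Mathlib
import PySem

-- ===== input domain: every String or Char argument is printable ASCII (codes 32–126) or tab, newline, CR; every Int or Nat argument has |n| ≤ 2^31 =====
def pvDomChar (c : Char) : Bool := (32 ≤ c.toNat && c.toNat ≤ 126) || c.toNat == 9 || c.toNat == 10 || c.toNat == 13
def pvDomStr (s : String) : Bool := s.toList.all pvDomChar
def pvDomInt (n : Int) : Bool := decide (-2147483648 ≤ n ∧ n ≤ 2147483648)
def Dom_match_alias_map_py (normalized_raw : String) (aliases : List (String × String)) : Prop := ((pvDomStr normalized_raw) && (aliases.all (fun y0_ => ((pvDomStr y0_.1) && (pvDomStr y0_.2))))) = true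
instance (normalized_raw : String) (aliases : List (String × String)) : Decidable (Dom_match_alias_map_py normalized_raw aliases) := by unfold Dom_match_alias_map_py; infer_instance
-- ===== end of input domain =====

-- B replaces A's filter + stable reverse sort + head by a single pass keeping the longest matching alias (objective: simpler).


-- ===== PORT A =====
-- 'aliases' is a Python dict: both ports read it through PySem.Dict.ofList (insertion order, last value wins).
def match_alias_map_py (normalized_raw : String) (aliases : List (String × String)) : Option String :=
  let d := PySem.Dict.ofList aliases
  match d.get? normalized_raw with
  | some v => some v
  | none =>
    let matching := d.items.filter (fun p => PySem.Str.isIn p.1 normalized_raw || PySem.Str.isIn normalized_raw p.1)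
    if matching = [] then none
    else
      let srt := PySem.List.sorted matching (fun p => PySem.Str.len p.1) true
      match PySem.List.pyGet? srt 0 with
      | some p => some p.2
      | none => none

-- ===== PORT B =====
def match_alias_map_py_alt (normalized_raw : String) (aliases : List (String × String)) : Option String :=
  let d := PySem.Dict.ofList aliases
  match d.get? normalized_raw with
  | some v => some v
  | none =>
    (d.items.foldl
      (fun (best : Option String × Int) p =>
        if ((PySem.Str.isIn p.1 normalized_raw || PySem.Str.isIn normalized_raw p.1)
              && decide (best.2 < PySem.Str.len p.1)) then
          (some p.2, PySem.Str.len p.1)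
        else best)
      (none, -1)).1

-- ===== PRECONDITION & SPEC =====
def Spec_match_alias_map_py (normalized_raw : String) (aliases : List (String × String)) (out : Option String) : Prop := out = match_alias_map_py_alt normalized_raw aliases
instance (normalized_raw : String) (aliases : List (String × String)) (out : Option String) : Decidable (Spec_match_alias_map_py normalized_raw aliases out) := by unfold Spec_match_alias_map_py; infer_instance

-- ===== CLAIM (what is proved, stated in full; the proofs are below) =====
def Claim_equal_match_alias_map_py : Prop := ∀ (normalized_raw : String) (aliases : List (String × String)), Dom_match_alias_map_py normalized_raw aliases → Spec_match_alias_map_py normalized_raw aliases (match_alias_map_py normalized_raw aliases)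

-- ===== LEMMAS AND PROOFS =====

-- first-max-wins step on whole pairs (proof-only abstraction of both sides' tie-breaking)
def pvStep (bef : (String × String) → (String × String) → Bool)
    (b : Option (String × String)) (x : String × String) : Option (String × String) :=
  match b with
  | none => some x
  | some y => if bef x y then some x else b

theorem head?_insertBy (bef : (String × String) → (String × String) → Bool)
    (x : String × String) (ys : List (String × String)) :
    (PySem.List.insertBy bef x ys).head? = pvStep bef ys.head? x := by
  cases ys with
  | nil => simp [PySem.List.insertBy, pvStep]
  | cons y t =>
    simp only [PySem.List.insertBy, pvStep, List.head?_cons]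
    split_ifs <;> simp

theorem head?_foldl_insertBy (bef : (String × String) → (String × String) → Bool)
    (xs acc : List (String × String)) :
    (xs.foldl (fun acc x => PySem.List.insertBy bef x acc) acc).head? =
    xs.foldl (pvStep bef) acc.head? := by
  induction xs generalizing acc with
  | nil => rfl
  | cons x t ih => simp only [List.foldl_cons, ih, head?_insertBy]

-- B's (value, length) accumulator encodes the current best pair
def pvEnc (key : (String × String) → Int) (b : Option (String × String)) : Option String × Int :=
  match b with
  | none => (none, -1)
  | some y => (some y.2, key y)

theorem foldl_enc (key : (String × String) → Int) (hk : ∀ p, 0 ≤ key p)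
    (m : List (String × String)) (s : Option (String × String)) :
    m.foldl (fun (best : Option String × Int) p =>
        if decide (best.2 < key p) then (some p.2, key p) else best)
      (pvEnc key s) =
    pvEnc key (m.foldl (pvStep (fun a b => decide (key b < key a))) s) := by
  induction m generalizing s with
  | nil => rfl
  | cons p t ih =>
    simp only [List.foldl_cons]
    have hstep : (if decide ((pvEnc key s).2 < key p) then (some p.2, key p) else pvEnc key s)
        = pvEnc key (pvStep (fun a b => decide (key b < key a)) s p) := by
      cases s with
      | none =>
        have h : (-1 : Int) < key p := lt_of_lt_of_le (by norm_num) (hk p)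
        simp [pvEnc, pvStep, h]
      | some y =>
        by_cases h : key y < key p <;> simp [pvEnc, pvStep, h]
    rw [hstep, ih]

theorem foldl_some (bef : (String × String) → (String × String) → Bool)
    (u : List (String × String)) (y : String × String) :
    ∃ z, u.foldl (pvStep bef) (some y) = some z := by
  induction u generalizing y with
  | nil => exact ⟨y, rfl⟩
  | cons a u ih =>
    rw [List.foldl_cons]
    cases h : bef a y with
    | true => rw [show pvStep bef (some y) a = some a from by simp [pvStep, h]]; exact ih a
    | false => rw [show pvStep bef (some y) a = some y from by simp [pvStep, h]]; exact ih y

theorem match_alias_map_py_eq (normalized_raw : String) (aliases : List (String × String)) :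
    match_alias_map_py normalized_raw aliases = match_alias_map_py_alt normalized_raw aliases := by
  unfold match_alias_map_py match_alias_map_py_alt
  cases hget : (PySem.Dict.ofList aliases).get? normalized_raw with
  | some v => simp only [hget]
  | none =>
    simp only [hget]
    generalize (PySem.Dict.ofList aliases).items = l
    have hget0 : ∀ xs : List (String × String), PySem.List.pyGet? xs 0 = xs.head? := by
      intro xs; cases xs <;> simp [PySem.List.pyGet?, PySem.List.pyIdx?]
    set pb : (String × String) → Bool :=
      fun p => PySem.Str.isIn p.1 normalized_raw || PySem.Str.isIn normalized_raw p.1 with hpb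
    set key : (String × String) → Int := fun p => PySem.Str.len p.1 with hkey
    have hk : ∀ p, 0 ≤ key p := by intro p; simp [hkey]
    have h1 : List.foldl (fun (best : Option String × Int) p =>
          if (pb p && decide (best.2 < key p)) then (some p.2, key p) else best) (none, -1) l
        = List.foldl (fun (best : Option String × Int) p =>
          if pb p then (if decide (best.2 < key p) then (some p.2, key p) else best) else best) (none, -1) l :=
      PySem.List.foldl_congr_mem _ _ _ _ (by intro acc p _; cases h : pb p <;> simp [h] <;> rfl)
    have h2 := PySem.List.foldl_if_eq_foldl_filter pb
      (fun (best : Option String × Int) p => if decide (best.2 < key p) then (some p.2, key p) else best)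
      (((none, -1)) : Option String × Int) (l := l)
    beta_reduce at h2
    have h3 := foldl_enc key hk (l.filter pb) none
    simp only [pvEnc] at h3
    rw [h1, h2, h3, PySem.List.sorted_rev_eq_foldl_insertBy]
    cases hm : l.filter pb with
    | nil => simp
    | cons q t =>
      have hne : q :: t ≠ [] := by simp
      rw [if_neg hne, hget0, head?_foldl_insertBy]
      simp only [List.head?_nil, List.foldl_cons]
      rw [show pvStep (fun a b => decide (key b < key a)) none q = some q from rfl]
      obtain ⟨z, hz⟩ := foldl_some (fun a b => decide (key b < key a)) t q
      rw [hz]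

-- ===== VERDICT (by name: the statement is the Claim_ definition above) =====
theorem match_alias_map_py_spec : Claim_equal_match_alias_map_py := by
  intro nr al _
  exact match_alias_map_py_eq nr al
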